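-- pv_equiv track=rewrite | github.com/yash-amd/shark-ai | sharktank/sharktank/ops/_registry.py | _matches_impl_selection
-- ===== SOURCE A (Python) =====
-- def _matches_impl_selection(impl_name: str | None, selection: str) -> bool:
--     """Check if impl_name matches the given selection using hierarchical matching.
--
--     Matches are done segment by segment, split by dots:
--     - "sharktank" matches "sharktank", "sharktank.wave", "sharktank.asm"
--     - "sharktank.wave" matches "sharktank.wave" but not "sharktank.asm"
--     - "sharktank.wavelet" does not match "sharktank.wave"
--
--     Args:
--         impl_name: The _impl_name attribute from the override
--         selection: A selection string, "*" matches anything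
--
--     Returns:
--         True if impl_name matches the selection
--     """
--     if selection == "*":
--         return True
--     if impl_name is None:
--         raise LookupError(
--             "A kernel selection was specified and an implementation gave no implementation name"
--         )
--     # Split both into hierarchical segments
--     selection_segments = selection.split(".")
--     impl_segments = impl_name.split(".")
--     # Selection must not have more segments than impl_name
--     if len(selection_segments) > len(impl_segments):
--         return False
--     # Each selection segment must exactly match the corresponding impl segment
--     for sel_seg, impl_seg in zip(selection_segments, impl_segments):
--         if sel_seg != impl_seg:
--             return False
--
--     return True
-- ===== SOURCE B (Python) =====
-- def _matches_impl_selection(impl_name, selection):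
--     if selection == "*":
--         return True
--     if impl_name is None:
--         raise LookupError(
--             "A kernel selection was specified and an implementation gave no implementation name"
--         )
--     # Segment-prefix match without splitting: the '.' appended to the
--     # selection enforces the segment boundary.
--     return impl_name == selection or impl_name.startswith(selection + ".")
-- ===== Notes on version B (the rewrite author's own statement) =====
-- stated objective: simpler
-- what changed: Replaces the split-into-segment-lists plus zip/loop comparison with a single string decision: impl_name == selection or impl_name.startswith(selection + '.'), the appended '.' enforcing the segment boundary; no lists are built and no loop is written.
import Mathlib
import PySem

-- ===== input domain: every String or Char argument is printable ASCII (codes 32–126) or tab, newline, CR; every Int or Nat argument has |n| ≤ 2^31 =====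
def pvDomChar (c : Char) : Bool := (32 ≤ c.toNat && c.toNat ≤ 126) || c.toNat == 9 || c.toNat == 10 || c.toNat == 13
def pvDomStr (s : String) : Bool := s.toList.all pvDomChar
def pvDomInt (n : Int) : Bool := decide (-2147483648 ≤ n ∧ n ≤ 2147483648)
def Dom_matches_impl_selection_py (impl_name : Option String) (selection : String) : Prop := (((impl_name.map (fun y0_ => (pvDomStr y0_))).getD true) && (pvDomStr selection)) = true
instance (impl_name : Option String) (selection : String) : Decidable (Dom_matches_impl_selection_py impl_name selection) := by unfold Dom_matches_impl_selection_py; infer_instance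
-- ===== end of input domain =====

-- B replaces A's split-into-segment-lists + zip loop by a single string decision
-- (impl == selection, or impl starts with selection ++ "."): simpler, no lists, no loop.
-- A raises LookupError when impl_name is None and selection ≠ "*"; B raises the same; Pre_ excludes exactly those inputs.


-- ===== PORT A =====
def matches_impl_selection_py (impl_name : Option String) (selection : String) : Bool :=
  if selection == "*" then true
  else
    match impl_name with
    | none => false  -- Python raises LookupError here; excluded by Pre_
    | some name =>
      let selection_segments := PySem.Chars.splitOn selection.toList ['.']
      let impl_segments := PySem.Chars.splitOn name.toList ['.']
      if selection_segments.length > impl_segments.length then false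
      else (selection_segments.zip impl_segments).all (fun p => p.1 == p.2)

-- ===== PORT B =====
def matches_impl_selection_py_alt (impl_name : Option String) (selection : String) : Bool :=
  if selection == "*" then true
  else
    match impl_name with
    | none => false  -- Python raises LookupError here; excluded by Pre_
    | some name => name == selection || PySem.Str.startswith name (selection ++ ".")

-- ===== PRECONDITION & SPEC =====
-- Pre_ excludes exactly the inputs where A raises LookupError (impl_name is None with a non-"*" selection).
def Pre_matches_impl_selection_py (impl_name : Option String) (selection : String) : Prop :=
  selection = "*" ∨ impl_name ≠ none
instance (impl_name : Option String) (selection : String) : Decidable (Pre_matches_impl_selection_py impl_name selection) := by unfold Pre_matches_impl_selection_py; infer_instance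
def pvWitness_matches_impl_selection_py : Option String × String := (some "sharktank.wave", "sharktank")

def Spec_matches_impl_selection_py (impl_name : Option String) (selection : String) (out : Bool) : Prop := out = matches_impl_selection_py_alt impl_name selection
instance (impl_name : Option String) (selection : String) (out : Bool) : Decidable (Spec_matches_impl_selection_py impl_name selection out) := by unfold Spec_matches_impl_selection_py; infer_instance

-- ===== CLAIM (what is proved, stated in full; the proofs are below) =====
def Claim_equal_matches_impl_selection_py : Prop := ∀ (impl_name : Option String) (selection : String), Dom_matches_impl_selection_py impl_name selection → Pre_matches_impl_selection_py impl_name selection → Spec_matches_impl_selection_py impl_name selection (matches_impl_selection_py impl_name selection)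

-- ===== LEMMAS AND PROOFS =====

-- PySem's fuelled splitOn with a single-character separator computes Mathlib's List.splitOn.
theorem pv_go_eq (c : Char) : ∀ (fuel : Nat) (l cur : List Char) (acc : List (List Char)),
    l.length ≤ fuel →
    PySem.Chars.splitOn.go [c] fuel l cur acc
      = acc.reverse ++ List.modifyHead (cur.reverse ++ ·) (List.splitOn c l) := by
  intro fuel
  induction fuel with
  | zero =>
    intro l cur acc h
    have : l = [] := List.eq_nil_of_length_eq_zero (Nat.le_zero.mp h)
    subst this
    simp [PySem.Chars.splitOn.go, List.splitOn]
  | succ n ih =>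
    intro l cur acc h
    cases l with
    | nil => simp [PySem.Chars.splitOn.go, List.splitOn]
    | cons x rest =>
      simp only [PySem.Chars.splitOn.go]
      by_cases hx : x = c
      · subst hx
        simp only [List.isPrefixOf, BEq.rfl, Bool.true_and, if_true]
        rw [show List.drop ([x].length) (x :: rest) = rest from by simp]
        rw [ih rest [] (cur.reverse :: acc) (by simpa using Nat.le_of_succ_le_succ h)]
        cases hsp : List.splitOnP (fun y => y == x) rest with
        | nil => exact absurd hsp (List.splitOnP_ne_nil _ _)
        | cons h0 tl => simp [List.splitOn, List.splitOnP_cons, hsp]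
      · have hbeq : ([c].isPrefixOf (x :: rest)) = false := by
          simp [List.isPrefixOf]
          exact fun hcx => absurd hcx.symm hx
        rw [hbeq]
        simp only [if_false, Bool.false_eq_true]
        rw [ih rest (x :: cur) acc (by simpa using Nat.le_of_succ_le_succ h)]
        have hne := List.splitOnP_ne_nil (fun a => a == c) rest
        simp only [List.splitOn, List.splitOnP_cons, beq_iff_eq, hx, if_false]
        obtain ⟨hhd, tl, hsp⟩ := List.exists_cons_of_ne_nil hne
        rw [hsp]
        simp

theorem pv_splitOn_eq (c : Char) (l : List Char) :
    PySem.Chars.splitOn l [c] = List.splitOn c l := by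
  unfold PySem.Chars.splitOn
  rw [pv_go_eq c (l.length + 1) l [] [] (Nat.le_succ _)]
  have hne := List.splitOnP_ne_nil (fun a => a == c) l
  simp only [List.splitOn] at *
  obtain ⟨hhd, tl, hsp⟩ := List.exists_cons_of_ne_nil hne
  rw [hsp]; simp

theorem pv_intercalate_append (c : Char) (a : List Char) (B : List (List Char)) (hB : B ≠ []) :
    [c].intercalate (a :: B) = a ++ c :: [c].intercalate B := by
  obtain ⟨b, B', rfl⟩ := List.exists_cons_of_ne_nil hB
  induction B' generalizing a b with
  | nil => simp [List.intercalate]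
  | cons x xs ih => simp [List.intercalate] at ih ⊢

theorem pv_splitOn_append (c : Char) (s u : List Char) :
    List.splitOn c (s ++ c :: u) = List.splitOn c s ++ List.splitOn c u := by
  induction s with
  | nil => simp [List.splitOn, List.splitOnP_cons]
  | cons x s' ih =>
    simp only [List.cons_append, List.splitOn, List.splitOnP_cons] at *
    by_cases hx : x = c
    · simp [hx, ih]
    · simp only [beq_iff_eq, hx, if_false]
      rw [ih]
      have hne := List.splitOnP_ne_nil (fun a => a == c) (s' ++ c :: u)
      have hne' := List.splitOnP_ne_nil (fun a => a == c) s'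
      obtain ⟨h1, t1, e1⟩ := List.exists_cons_of_ne_nil hne'
      rw [e1]
      simp

-- the key characterisation: segment-list prefix ↔ equality or string prefix with the separator appended
theorem pv_intercalate_append2 (c : Char) (A B : List (List Char)) (hA : A ≠ []) (hB : B ≠ []) :
    [c].intercalate (A ++ B) = [c].intercalate A ++ c :: [c].intercalate B := by
  induction A with
  | nil => exact absurd rfl hA
  | cons a A' ih =>
    cases A' with
    | nil => simpa [List.intercalate] using pv_intercalate_append c a B hB
    | cons a2 A2 =>
      rw [List.cons_append, pv_intercalate_append c a ((a2 :: A2) ++ B) (by simp),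
          ih (by simp), pv_intercalate_append c a (a2 :: A2) (by simp)]
      simp

-- the key characterisation: segment-list prefix ↔ equality or string prefix with the separator appended
theorem pv_prefix_splitOn_iff (c : Char) (s t : List Char) :
    List.splitOn c s <+: List.splitOn c t ↔ s = t ∨ (s ++ [c]) <+: t := by
  constructor
  · rintro ⟨r, hr⟩
    cases r with
    | nil =>
      left
      have h := congrArg ([c].intercalate) hr
      simp only [List.append_nil, List.intercalate_splitOn] at h
      exact h
    | cons r0 rs =>
      right
      have hsp : List.splitOn c s ≠ [] := by
        simp only [List.splitOn]; exact List.splitOnP_ne_nil _ _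
      have ht : t = s ++ c :: [c].intercalate (r0 :: rs) := by
        conv_lhs => rw [← List.intercalate_splitOn t c, ← hr]
        rw [pv_intercalate_append2 c _ _ hsp (by simp), List.intercalate_splitOn]
      exact ⟨[c].intercalate (r0 :: rs), by rw [ht]; simp⟩
  · rintro (rfl | ⟨u, hu⟩)
    · exact List.prefix_refl _
    · have h : t = s ++ c :: u := by simpa using hu.symm
      subst h
      rw [pv_splitOn_append]
      exact ⟨_, rfl⟩

-- A's length guard + zip loop computes list prefix
theorem pv_zip_all_eq_prefix (a b : List (List Char)) :
    (if a.length > b.length then false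
     else (a.zip b).all (fun p => p.1 == p.2)) = decide (a <+: b) := by
  induction a generalizing b with
  | nil => simp
  | cons x a' ih =>
    cases b with
    | nil => simp
    | cons y b' =>
      have := ih b'
      by_cases hl : a'.length > b'.length
      · have hnp : ¬ (a' <+: b') := fun hp => absurd hp.length_le (by omega)
        simp [hl, List.cons_prefix_cons, hnp]
      · have hle : ¬ ((x :: a').length > (y :: b').length) := by simp at hl ⊢; omega
        rw [if_neg hle]
        rw [if_neg hl] at this
        simp only [List.zip_cons_cons, List.all_cons, this, List.cons_prefix_cons]
        by_cases hxy : x = y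
        · simp [hxy]
        · simp [hxy]

-- ===== VERDICT (by name: the statement is the Claim_ definition above) =====
theorem matches_impl_selection_py_spec : Claim_equal_matches_impl_selection_py := by
  intro impl_name selection _ hpre
  unfold Spec_matches_impl_selection_py matches_impl_selection_py matches_impl_selection_py_alt
  by_cases hstar : selection = "*"
  · simp [hstar]
  · have hb : (selection == "*") = false := by simpa using hstar
    rw [hb]
    simp only [Bool.false_eq_true, if_false]
    cases impl_name with
    | none => rfl
    | some name =>
      simp only [pv_splitOn_eq]
      rw [pv_zip_all_eq_prefix]
      have h1 : (name == selection) = decide (selection.toList = name.toList) := by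
        rw [Bool.eq_iff_iff]
        simp only [beq_iff_eq, decide_eq_true_eq, ← String.toList_inj]
        exact eq_comm
      have h2 : PySem.Str.startswith name (selection ++ ".")
          = decide ((selection.toList ++ ['.']) <+: name.toList) := by
        rw [PySem.Str.startswith, Bool.eq_iff_iff, PySem.Chars.startswith_iff]
        simp [String.toList_append]
      rw [h1, h2, ← Bool.decide_or, decide_eq_decide]
      exact pv_prefix_splitOn_iff '.' selection.toList name.toList
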